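-- pv_equiv track=rewrite | github.com/PhilChodrow/CSCI-0145 | lecture-scripts/recursion-review.py | abs
-- ===== SOURCE A (Python) =====
-- def abs(L):
--     if L == []:
--         return L
--     else:
--         if L[0] < 0:
--             return [-L[0]] + abs(L[1:])
--         else:
--             return [L[0]] + abs(L[1:])
-- ===== SOURCE B (Python) =====
-- def abs(L):
--     result = []
--     for x in L:
--         if x < 0:
--             result.append(-x)
--         else:
--             result.append(x)
--     return result
-- ===== Notes on version B (the rewrite author's own statement) =====
-- stated objective: faster
-- what changed: Replaces the tail recursion with repeated list slicing and front concatenation by a single iterative pass appending to an accumulator list.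
import Mathlib
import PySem

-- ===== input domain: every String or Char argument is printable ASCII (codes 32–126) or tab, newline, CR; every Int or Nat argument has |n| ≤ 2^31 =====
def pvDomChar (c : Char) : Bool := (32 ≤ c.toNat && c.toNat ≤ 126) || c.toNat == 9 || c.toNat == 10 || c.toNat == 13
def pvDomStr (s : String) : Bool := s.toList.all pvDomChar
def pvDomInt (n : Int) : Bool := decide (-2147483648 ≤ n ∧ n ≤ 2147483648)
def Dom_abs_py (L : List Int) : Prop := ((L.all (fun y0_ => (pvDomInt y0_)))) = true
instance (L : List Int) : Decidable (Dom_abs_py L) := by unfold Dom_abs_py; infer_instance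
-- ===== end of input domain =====

-- B: single iterative pass with an accumulator instead of tail recursion with slicing/concatenation (simpler decomposition).
-- ===== PORT A =====
def abs_py (L : List Int) : List Int :=
  match L with
  | [] => L
  | x :: rest =>
    if x < 0 then [-x] ++ abs_py rest
    else [x] ++ abs_py rest

-- ===== PORT B =====
def absLoop (result : List Int) (L : List Int) : List Int :=
  match L with
  | [] => result
  | x :: rest => absLoop (result ++ [if x < 0 then -x else x]) rest

def abs_py_alt (L : List Int) : List Int := absLoop [] L

-- ===== PRECONDITION & SPEC =====
def Spec_abs_py (L : List Int) (out : List Int) : Prop := out = abs_py_alt L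
instance (L : List Int) (out : List Int) : Decidable (Spec_abs_py L out) := by unfold Spec_abs_py; infer_instance

-- ===== CLAIM (what is proved, stated in full; the proofs are below) =====
def Claim_equal_abs_py : Prop := ∀ (L : List Int), Dom_abs_py L → Spec_abs_py L (abs_py L)

-- ===== LEMMAS AND PROOFS =====

-- ===== VERDICT (by name: the statement is the Claim_ definition above) =====
theorem absLoop_acc (L : List Int) : ∀ acc, absLoop acc L = acc ++ absLoop [] L := by
  induction L with
  | nil => intro acc; simp [absLoop]
  | cons x rest ih =>
    intro acc
    simp only [absLoop]
    rw [ih (acc ++ [if x < 0 then -x else x]), ih ([] ++ [if x < 0 then -x else x])]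
    simp

theorem abs_py_eq (L : List Int) : abs_py L = abs_py_alt L := by
  induction L with
  | nil => rfl
  | cons x rest ih =>
    simp only [abs_py, abs_py_alt, absLoop]
    rw [absLoop_acc rest]
    split_ifs <;> simp [ih, abs_py_alt]

theorem abs_py_spec : Claim_equal_abs_py := by
  intro L _
  exact abs_py_eq L
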